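-- pv_equiv track=rewrite | github.com/malittlevina/unimind | native_models/llm_engine.py | _establish_event_ordering
-- ===== SOURCE A (Python) =====
-- from typing import Optional, List, Dict, Any, Callable, Union, AsyncGenerator, Tuple
-- from typing import List, Dict, Any, Optional
--
-- def _establish_event_ordering(events: List[str]) -> List[str]:
--     """Establish temporal ordering of events."""
--     # Simple ordering based on temporal indicators
--     ordered_events = []
--     remaining_events = events.copy()
--
--     # Look for events with clear temporal indicators
--     for event in events:
--         event_lower = event.lower()
--         if any(word in event_lower for word in ["first", "begin", "start"]):
--             if event not in ordered_events:
--                 ordered_events.append(event)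
--                 remaining_events.remove(event)
--         elif any(word in event_lower for word in ["last", "end", "finish"]):
--             if event not in ordered_events:
--                 ordered_events.append(event)
--                 remaining_events.remove(event)
--
--     # Add remaining events in original order
--     ordered_events.extend(remaining_events)
--     return ordered_events
-- ===== SOURCE B (Python) =====
-- def _establish_event_ordering(events):
--     """Establish temporal ordering of events (single pass, no list.remove)."""
--     words = ("first", "begin", "start", "last", "end", "finish")
--     seen = set()
--     front, rest = [], []
--     for e in events:
--         el = e.lower()
--         if any(w in el for w in words) and e not in seen:
--             seen.add(e)
--             front.append(e)
--         else:
--             rest.append(e)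
--     return front + rest
-- ===== Notes on version B (the rewrite author's own statement) =====
-- stated objective: simpler
-- what changed: Replaced A's two identical elif branches plus interleaved list.remove on a shrinking copy of the input with one combined temporal-word test and a single forward pass that routes each event into a 'front' or 'rest' accumulator using a seen-set.
import Mathlib
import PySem

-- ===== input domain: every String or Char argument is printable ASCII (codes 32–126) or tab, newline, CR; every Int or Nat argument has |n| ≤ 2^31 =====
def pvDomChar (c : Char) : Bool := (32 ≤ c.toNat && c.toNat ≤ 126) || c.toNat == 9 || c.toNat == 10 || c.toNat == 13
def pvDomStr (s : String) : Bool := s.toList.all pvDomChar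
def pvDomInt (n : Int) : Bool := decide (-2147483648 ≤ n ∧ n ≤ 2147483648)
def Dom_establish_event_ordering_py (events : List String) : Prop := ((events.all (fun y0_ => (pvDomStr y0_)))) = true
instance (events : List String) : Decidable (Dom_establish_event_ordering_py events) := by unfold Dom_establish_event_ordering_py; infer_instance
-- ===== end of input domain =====

-- B is a single forward pass with two accumulators (front/rest) and a seen-set,
-- replacing A's interleaved list.remove on a shrinking copy; objective: simpler.

-- ===== PORT A =====
-- A tests the two temporal word groups in separate elif branches with identical bodies.
def pvTemp1 : List String := ["first", "begin", "start"]
def pvTemp2 : List String := ["last", "end", "finish"]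

def pvStepA (st : List String × List String) (event : String) : List String × List String :=
  if pvTemp1.any (fun w => PySem.Str.isIn w (PySem.Str.lower event)) then
    if st.1.contains event then st
    else (st.1 ++ [event], (PySem.List.remove? st.2 event).getD st.2)
  else if pvTemp2.any (fun w => PySem.Str.isIn w (PySem.Str.lower event)) then
    if st.1.contains event then st
    else (st.1 ++ [event], (PySem.List.remove? st.2 event).getD st.2)
  else st

def establish_event_ordering_py (events : List String) : List String :=
  let st := events.foldl pvStepA ([], events)
  st.1 ++ st.2

-- ===== PORT B =====
def pvWords : List String := ["first", "begin", "start", "last", "end", "finish"]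

def pvStepB (st : PySem.Set String × List String × List String) (e : String) :
    PySem.Set String × List String × List String :=
  if pvWords.any (fun w => PySem.Str.isIn w (PySem.Str.lower e)) && !(PySem.Set.contains st.1 e) then
    (PySem.Set.add st.1 e, st.2.1 ++ [e], st.2.2)
  else
    (st.1, st.2.1, st.2.2 ++ [e])

def establish_event_ordering_py_alt (events : List String) : List String :=
  let st := events.foldl pvStepB (PySem.Set.empty, [], [])
  st.2.1 ++ st.2.2

-- ===== PRECONDITION & SPEC =====
def Spec_establish_event_ordering_py (events : List String) (out : List String) : Prop := out = establish_event_ordering_py_alt events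
instance (events : List String) (out : List String) : Decidable (Spec_establish_event_ordering_py events out) := by unfold Spec_establish_event_ordering_py; infer_instance

-- ===== CLAIM (what is proved, stated in full; the proofs are below) =====
def Claim_equal_establish_event_ordering_py : Prop := ∀ (events : List String), Dom_establish_event_ordering_py events → Spec_establish_event_ordering_py events (establish_event_ordering_py events)

-- ===== LEMMAS AND PROOFS =====

-- the combined temporal test B uses
def pvTemporal (e : String) : Bool :=
  pvWords.any (fun w => PySem.Str.isIn w (PySem.Str.lower e))

-- B's single word list is A's two groups back to back
theorem pvTemporal_split (e : String) :
    pvTemporal e = ((pvTemp1.any fun w => PySem.Str.isIn w (PySem.Str.lower e)) ||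
                    (pvTemp2.any fun w => PySem.Str.isIn w (PySem.Str.lower e))) := by
  simp [pvTemporal, pvWords, pvTemp1, pvTemp2, List.any_cons, List.any_nil, Bool.or_assoc]

-- A's step, phrased through the combined test (both elif bodies are identical)
theorem pvStepA_eq (st : List String × List String) (e : String) :
    pvStepA st e =
      if pvTemporal e && !(List.contains st.1 e) then
        (st.1 ++ [e], (PySem.List.remove? st.2 e).getD st.2)
      else st := by
  rw [pvStepA, pvTemporal_split]
  cases h1 : (pvTemp1.any fun w => PySem.Str.isIn w (PySem.Str.lower e)) <;>
    cases h2 : (pvTemp2.any fun w => PySem.Str.isIn w (PySem.Str.lower e)) <;>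
      cases hm : st.1.contains e <;> simp

-- B's step with the Set primitives unfolded to list operations
theorem pvStepB_eq (st : PySem.Set String × List String × List String) (e : String) :
    pvStepB st e =
      if pvTemporal e && !(PySem.Set.contains st.1 e) then (st.1 ++ [e], st.2.1 ++ [e], st.2.2)
      else (st.1, st.2.1, st.2.2 ++ [e]) := by
  rw [pvStepB]
  cases ht : pvTemporal e <;> cases hm : List.contains st.1 e <;>
    simp_all [pvTemporal, PySem.Set.contains, PySem.Set.add]

-- main invariant: if every temporal element of `rest` is already in `front`,
-- A's fold from (front, rest ++ l) and B's fold from (front, front, rest) agree.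
theorem pvMain (l : List String) : ∀ (front rest : List String),
    (∀ e ∈ rest, pvTemporal e = true → e ∈ front) →
    ((l.foldl pvStepA (front, rest ++ l)).1 ++ (l.foldl pvStepA (front, rest ++ l)).2)
      = ((l.foldl pvStepB (front, front, rest)).2.1 ++ (l.foldl pvStepB (front, front, rest)).2.2) := by
  induction l with
  | nil => intro front rest _; simp
  | cons e l ih =>
    intro front rest hinv
    rw [List.foldl_cons, List.foldl_cons, pvStepA_eq, pvStepB_eq]
    by_cases ht : pvTemporal e = true
    · by_cases hm : e ∈ front
      · -- temporal but already collected: A skips, B appends e to rest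
        have hmcA : front.contains e = true := by simpa using hm
        have hmcB : PySem.Set.contains front e = true := by
          simpa [PySem.Set.contains] using hm
        have H := ih front (rest ++ [e]) (by
          intro x hx hxT
          rcases List.mem_append.mp hx with h | h
          · exact hinv x h hxT
          · simp at h; subst h; exact hm)
        rw [ht, hmcA, hmcB]
        simpa using H
      · -- temporal and new: A appends to ordered and removes e's first copy, B to front
        have hmcA : front.contains e = false := by simpa using hm
        have hmcB : PySem.Set.contains front e = false := by
          simpa [PySem.Set.contains] using hm
        have hnr : e ∉ rest := fun h => hm (hinv e h ht)
        have hrem : (PySem.List.remove? (rest ++ e :: l) e).getD (rest ++ e :: l) = rest ++ l := by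
          have hmem : e ∈ rest ++ e :: l := by simp
          rw [PySem.List.remove?_eq_some_erase _ _ hmem]
          simp [List.erase_append_right _ hnr]
        have H := ih (front ++ [e]) rest (by
          intro x hx hxT
          exact List.mem_append.mpr (Or.inl (hinv x hx hxT)))
        rw [ht, hmcA, hmcB]
        simpa [hrem] using H
    · -- not temporal: A leaves remaining, B appends e to rest
      have ht' : pvTemporal e = false := Bool.eq_false_iff.mpr ht
      have H := ih front (rest ++ [e]) (by
        intro x hx hxT
        rcases List.mem_append.mp hx with h | h
        · exact hinv x h hxT
        · simp at h; subst h; exact absurd hxT ht)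
      rw [ht']
      simpa using H

-- ===== VERDICT (by name: the statement is the Claim_ definition above) =====
theorem establish_event_ordering_py_spec : Claim_equal_establish_event_ordering_py := by
  intro events _
  unfold Spec_establish_event_ordering_py establish_event_ordering_py establish_event_ordering_py_alt
  have := pvMain events [] [] (by intro x hx; simp at hx)
  simpa [PySem.Set.empty] using this
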